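-- pv_equiv track=rewrite | github.com/sheff-slava/jetBrains_smart_calculator | calculator.py | convert_signs
-- ===== SOURCE A (Python) =====
-- def convert_signs(signs):
--     for sign in signs:
--         if sign not in ('+', '-'):
--             return 'Invalid expression'
--     result = signs[0]
--     for j in range(1, len(signs)):
--         result = '+' if result == signs[j] else '-'
--     return result
-- ===== SOURCE B (Python) =====
-- def convert_signs(signs):
--     if not all(c in '+-' for c in signs):
--         return 'Invalid expression'
--     return '-' if signs.count('-') % 2 == 1 else '+'
-- ===== Notes on version B (the rewrite author's own statement) =====
-- stated objective: simpler
-- what changed: A folds the sign pairwise left to right ('+' if running result equals next sign else '-'); B validates with all() and returns the closed-form parity of the minus-sign count ('-' iff signs.count('-') is odd).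
import Mathlib
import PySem

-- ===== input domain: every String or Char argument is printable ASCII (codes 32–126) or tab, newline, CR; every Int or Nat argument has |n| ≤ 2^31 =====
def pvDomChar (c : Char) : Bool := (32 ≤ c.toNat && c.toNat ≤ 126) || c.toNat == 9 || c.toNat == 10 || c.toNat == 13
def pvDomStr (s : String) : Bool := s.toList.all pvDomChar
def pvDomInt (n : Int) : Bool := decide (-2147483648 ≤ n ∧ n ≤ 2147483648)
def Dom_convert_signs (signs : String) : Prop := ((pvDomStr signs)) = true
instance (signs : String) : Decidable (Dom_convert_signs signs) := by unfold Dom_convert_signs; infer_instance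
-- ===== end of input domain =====

-- B replaces A's sequential sign-fold with a minus-count parity closed form (simpler); equivalence about return values on nonempty input.

-- ===== PORT A =====
-- 'for sign in signs: if sign not in ('+','-'): return 'Invalid expression''
def pvValidateA : List Char → Option String
  | [] => none
  | c :: rest => if !(c == '+' || c == '-') then some "Invalid expression" else pvValidateA rest

-- 'for j in range(1, len(signs)): result = '+' if result == signs[j] else '-''
def pvFoldA (l : List Char) (init : String) : String :=
  (PySem.List.pyRange 1 (l.length : Int) 1).foldl
    (fun result j => if result == String.ofList [PySem.List.pyGetD l j ' '] then "+" else "-") init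

def convert_signs (signs : String) : String :=
  match pvValidateA signs.toList with
  | some r => r
  | none =>
    match PySem.List.pyGet? signs.toList 0 with
    | none => ""           -- signs[0] raises IndexError on the empty string; excluded by Pre_
    | some c => pvFoldA signs.toList (String.ofList [c])

-- ===== PORT B =====
def convert_signs_alt (signs : String) : String :=
  if signs.toList.all (fun c => c == '+' || c == '-') then
    if signs.toList.count '-' % 2 == 1 then "-" else "+"
  else "Invalid expression"

-- ===== PRECONDITION & SPEC =====
-- Pre_ excludes only the empty string, on which A raises IndexError at signs[0].
def Pre_convert_signs (signs : String) : Prop := signs ≠ ""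
instance (signs : String) : Decidable (Pre_convert_signs signs) := by unfold Pre_convert_signs; infer_instance
def pvWitness_convert_signs : String := "+-"

def Spec_convert_signs (signs : String) (out : String) : Prop := out = convert_signs_alt signs
instance (signs : String) (out : String) : Decidable (Spec_convert_signs signs out) := by unfold Spec_convert_signs; infer_instance

-- ===== CLAIM (what is proved, stated in full; the proofs are below) =====
def Claim_equal_convert_signs : Prop := ∀ (signs : String), Dom_convert_signs signs → Pre_convert_signs signs → Spec_convert_signs signs (convert_signs signs)

-- ===== LEMMAS AND PROOFS =====

-- A's validation loop returns 'Invalid expression' exactly when some char is not '+'/'-'.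
theorem pvValidateA_eq (l : List Char) :
    pvValidateA l = if l.all (fun c => c == '+' || c == '-') then none else some "Invalid expression" := by
  induction l with
  | nil => rfl
  | cons c cs ih =>
    simp only [pvValidateA, List.all_cons]
    by_cases h : (c == '+' || c == '-') = true <;> simp [h, ih]

-- A's fold over a valid tail flips the running sign once per '-'.
theorem pvFold_tail (cs : List Char) (r : String)
    (hcs : cs.all (fun c => c == '+' || c == '-') = true)
    (hr : r = "+" ∨ r = "-") :
    cs.foldl (fun result c => if result == String.ofList [c] then "+" else "-") r
      = (if cs.count '-' % 2 = 0 then r else if r = "+" then "-" else "+") := by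
  induction cs generalizing r with
  | nil => simp
  | cons c cs ih =>
    simp only [List.all_cons, Bool.and_eq_true] at hcs
    obtain ⟨hc, hcs⟩ := hcs
    have hc' : c = '+' ∨ c = '-' := by
      rcases Bool.or_eq_true_iff.mp hc with h | h
      · exact Or.inl (beq_iff_eq.mp h)
      · exact Or.inr (beq_iff_eq.mp h)
    simp only [List.foldl_cons]
    rcases hc' with rfl | rfl
    · have hstep : (if (r == String.ofList ['+']) = true then ("+" : String) else "-") = r := by
        rcases hr with rfl | rfl <;> decide
      rw [hstep, ih r hcs hr]
      simp
    · have hstep : (if (r == String.ofList ['-']) = true then ("+" : String) else "-")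
          = (if r = "+" then "-" else "+") := by
        rcases hr with rfl | rfl <;> decide
      rw [hstep, ih _ hcs (by rcases hr with rfl | rfl <;> simp)]
      have hcount : List.count '-' ('-' :: cs) = cs.count '-' + 1 := by simp
      rw [hcount]
      by_cases hp : cs.count '-' % 2 = 0
      · have h1 : ¬ (cs.count '-' + 1) % 2 = 0 := by omega
        rcases hr with rfl | rfl <;> simp [hp, h1]
      · have h1 : (cs.count '-' + 1) % 2 = 0 := by omega
        rcases hr with rfl | rfl <;> simp [hp, h1]

theorem convert_signs_spec : Claim_equal_convert_signs := by
  intro signs _ hpre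
  unfold Spec_convert_signs convert_signs convert_signs_alt
  rw [pvValidateA_eq]
  by_cases hv : (signs.toList.all (fun c => c == '+' || c == '-')) = true
  · obtain ⟨c, cs, hl⟩ : ∃ c cs, signs.toList = c :: cs := by
      rcases h : signs.toList with _ | ⟨c, cs⟩
      · exact absurd (by simpa using h) hpre
      · exact ⟨c, cs, rfl⟩
    simp only [hv, if_true]
    rw [hl]
    simp only [PySem.List.pyGet?_zero_cons]
    unfold pvFoldA
    have hfold := PySem.List.foldl_pyRange_pyGetD' (c :: cs) ' '
        (fun result ch => if result == String.ofList [ch] then "+" else "-") (String.ofList [c])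
        (a := 1) (by omega)
    rw [(by simpa using hfold : (PySem.List.pyRange 1 ((c :: cs).length : Int) 1).foldl
        (fun result j => if result == String.ofList [PySem.List.pyGetD (c :: cs) j ' '] then "+" else "-")
        (String.ofList [c]) = cs.foldl (fun result ch => if result == String.ofList [ch] then "+" else "-") (String.ofList [c]))]
    rw [hl] at hv
    simp only [List.all_cons, Bool.and_eq_true] at hv
    obtain ⟨hc, hcs⟩ := hv
    have hc' : c = '+' ∨ c = '-' := by
      rcases Bool.or_eq_true_iff.mp hc with h | h
      · exact Or.inl (beq_iff_eq.mp h)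
      · exact Or.inr (beq_iff_eq.mp h)
    rcases hc' with rfl | rfl
    · rw [pvFold_tail cs _ hcs (Or.inl rfl)]
      have hcount : List.count '-' ('+' :: cs) = cs.count '-' := by simp
      rw [hcount]
      by_cases hp : cs.count '-' % 2 = 0
      · have h1 : ¬ cs.count '-' % 2 = 1 := by omega
        simp [hp, h1]
      · have h1 : cs.count '-' % 2 = 1 := by omega
        simp [hp, h1]
    · rw [pvFold_tail cs _ hcs (Or.inr rfl)]
      have hcount : List.count '-' ('-' :: cs) = cs.count '-' + 1 := by simp
      rw [hcount]
      by_cases hp : cs.count '-' % 2 = 0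
      · have h1 : (cs.count '-' + 1) % 2 = 1 := by omega
        simp [hp, h1]
      · have h1 : ¬ (cs.count '-' + 1) % 2 = 1 := by omega
        simp [hp, h1]
  · simp [hv]

-- ===== VERDICT (by name: the statement is the Claim_ definition above) =====
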